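-- pv_equiv track=rewrite | github.com/CloudEngineerAbiran/CloudEngineerAbiran | failed_login_detector.py | users_with_suspicious_failures
-- ===== SOURCE A (Python) =====
-- from collections import defaultdict
-- from typing import Iterable, List, Sequence, Tuple
--
-- LogRecord = Tuple[str, int, bool]  # (username, timestamp_in_minutes, is_failure)
--
-- def users_with_suspicious_failures(logs: Sequence[LogRecord]) -> List[str]:
--     """
--     Return sorted list of usernames with >=3 failed attempts within any 5-minute window.
--
--     Args:
--         logs: Iterable of (username, timestamp, is_failure)
--
--     Returns:
--         Sorted list of suspicious usernames.
--     """
--     failed_by_user = defaultdict(list)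
--
--     # 1) Collect failed timestamps per user.
--     for username, timestamp, is_failure in logs:
--         if is_failure:
--             failed_by_user[username].append(timestamp)
--
--     suspicious_users = []
--
--     # 2) For each user, sort and apply sliding window.
--     for username, times in failed_by_user.items():
--         times.sort()
--         left = 0
--
--         for right in range(len(times)):
--             while times[right] - times[left] > 5:
--                 left += 1
--
--             # Current window size = right - left + 1
--             if right - left + 1 >= 3:
--                 suspicious_users.append(username)
--                 break
--
--     return sorted(suspicious_users)
-- ===== SOURCE B (Python) =====
-- from collections import defaultdict
--
--
-- def _has_burst(times):
--     # times is sorted: a 5-minute window with >=3 failures exists iff some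
--     # three CONSECUTIVE sorted timestamps span at most 5 minutes.
--     return any(times[i + 2] - times[i] <= 5 for i in range(len(times) - 2))
--
--
-- def users_with_suspicious_failures(logs):
--     failed_by_user = defaultdict(list)
--     for username, timestamp, is_failure in logs:
--         if is_failure:
--             failed_by_user[username].append(timestamp)
--     return sorted(u for u, ts in failed_by_user.items() if _has_burst(sorted(ts)))
-- ===== Notes on version B (the rewrite author's own statement) =====
-- stated objective: simpler
-- what changed: The two-pointer sliding window with an inner while-shrink is replaced by a single scan over consecutive sorted triples (times[i+2]-times[i] <= 5), and the accumulator loop by a filtered comprehension over the grouped dict.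
import Mathlib
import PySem

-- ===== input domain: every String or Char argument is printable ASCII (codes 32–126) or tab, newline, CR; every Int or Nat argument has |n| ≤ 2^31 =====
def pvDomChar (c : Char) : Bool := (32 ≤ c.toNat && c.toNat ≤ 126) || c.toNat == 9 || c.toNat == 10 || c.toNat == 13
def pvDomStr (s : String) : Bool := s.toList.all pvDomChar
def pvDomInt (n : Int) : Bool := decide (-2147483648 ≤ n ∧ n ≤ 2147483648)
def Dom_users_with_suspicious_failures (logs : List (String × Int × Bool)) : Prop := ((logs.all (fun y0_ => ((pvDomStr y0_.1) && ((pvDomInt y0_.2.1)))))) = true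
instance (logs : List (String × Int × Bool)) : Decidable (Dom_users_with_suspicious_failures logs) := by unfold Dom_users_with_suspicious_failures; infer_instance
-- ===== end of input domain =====

-- B replaces A's two-pointer sliding window by a scan over consecutive sorted
-- triples and the accumulator loop by a filtered comprehension (simpler, same cost).

-- ===== PORT A =====
-- while times[right] - times[left] > 5: left += 1   (guard left < right only makes it total;
-- on the sorted lists it runs on, the condition is false anyway when left = right)
def pvShrink (ts : List Int) (right left : Nat) : Nat :=
  if _h : left < right then
    if PySem.List.pyGetD ts (right : Int) 0 - PySem.List.pyGetD ts (left : Int) 0 > 5 then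
      pvShrink ts right (left + 1)
    else left
  else left
termination_by right - left

-- for right in range(len(times)): … if right - left + 1 >= 3: append & break
def pvWinLoop (ts : List Int) (right left : Nat) : Bool :=
  if _h : right < ts.length then
    let left' := pvShrink ts right left
    if right - left' + 1 ≥ 3 then true
    else pvWinLoop ts (right + 1) left'
  else false
termination_by ts.length - right

def users_with_suspicious_failures (logs : List (String × Int × Bool)) : List String :=
  let failed := logs.foldl (fun d r =>
    match r with
    | (username, timestamp, is_failure) =>
      if is_failure then d.modify username [] (fun l => l ++ [timestamp]) else d)
    PySem.Dict.empty
  let suspicious := failed.items.foldl (fun acc p =>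
    let times := PySem.List.sorted p.2 (fun x => x) false
    if pvWinLoop times 0 0 then acc ++ [p.1] else acc) []
  PySem.List.sorted suspicious (fun x => x) false

-- ===== PORT B =====
-- any(times[i+2] - times[i] <= 5 for i in range(len(times) - 2))
def pvHasBurst (ts : List Int) : Bool :=
  (PySem.List.pyRange 0 ((ts.length : Int) - 2) 1).any (fun i =>
    decide (PySem.List.pyGetD ts (i + 2) 0 - PySem.List.pyGetD ts i 0 ≤ 5))

def users_with_suspicious_failures_alt (logs : List (String × Int × Bool)) : List String :=
  let failed := logs.foldl (fun d r =>
    if r.2.2 then d.modify r.1 [] (fun l => l ++ [r.2.1]) else d) PySem.Dict.empty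
  PySem.List.sorted
    ((failed.items.filter (fun p =>
        pvHasBurst (PySem.List.sorted p.2 (fun x => x) false))).map (fun p => p.1))
    (fun x => x) false

-- ===== PRECONDITION & SPEC =====
def Spec_users_with_suspicious_failures (logs : List (String × Int × Bool)) (out : List String) : Prop := out = users_with_suspicious_failures_alt logs
instance (logs : List (String × Int × Bool)) (out : List String) : Decidable (Spec_users_with_suspicious_failures logs out) := by unfold Spec_users_with_suspicious_failures; infer_instance

-- ===== CLAIM (what is proved, stated in full; the proofs are below) =====
def Claim_equal_users_with_suspicious_failures : Prop := ∀ (logs : List (String × Int × Bool)), Dom_users_with_suspicious_failures logs → Spec_users_with_suspicious_failures logs (users_with_suspicious_failures logs)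


-- ===== LEMMAS AND PROOFS =====

-- shorthand used only by the proofs below
def pvGet (ts : List Int) (k : Nat) : Int := ts.getD k 0

-- canonical middle form both loops are reduced to
def pvBurstB (ts : List Int) : Bool :=
  (List.range (ts.length - 2)).any (fun k => decide (pvGet ts (k + 2) - pvGet ts k ≤ 5))

theorem pvBurstB_eq_true (ts : List Int) :
    pvBurstB ts = true ↔ ∃ k, k + 2 < ts.length ∧ pvGet ts (k + 2) - pvGet ts k ≤ 5 := by
  unfold pvBurstB
  simp only [List.any_eq_true, List.mem_range, decide_eq_true_eq]
  constructor
  · rintro ⟨k, hk, h⟩; exact ⟨k, by omega, h⟩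
  · rintro ⟨k, hk, h⟩; exact ⟨k, by omega, h⟩

theorem pvShrink_spec (ts : List Int) (right left : Nat) (hlr : left ≤ right)
    (hmin : ∀ j < left, 5 < pvGet ts right - pvGet ts j) :
    pvShrink ts right left ≤ right ∧
      pvGet ts right - pvGet ts (pvShrink ts right left) ≤ 5 ∧
      (∀ j < pvShrink ts right left, 5 < pvGet ts right - pvGet ts j) := by
  fun_induction pvShrink ts right left with
  | case1 left h hc ih =>
      simp only [PySem.List.pyGetD_natCast] at hc
      refine ih (by omega) ?_
      intro j hj
      rcases Nat.lt_succ_iff_lt_or_eq.mp hj with hj' | hj'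
      · exact hmin j hj'
      · subst hj'; simpa [pvGet] using hc
  | case2 left h hc =>
      simp only [PySem.List.pyGetD_natCast] at hc
      refine ⟨by omega, ?_, hmin⟩
      simpa [pvGet] using hc
  | case3 left h =>
      have : left = right := by omega
      subst this
      exact ⟨le_rfl, by simp [pvGet], hmin⟩

theorem pvWinLoop_eq (ts : List Int)
    (mono : ∀ p q : Nat, p ≤ q → q < ts.length → pvGet ts p ≤ pvGet ts q) :
    ∀ fuel right left, ts.length ≤ right + fuel → left ≤ right →
      (∀ j < left, right < ts.length → 5 < pvGet ts right - pvGet ts j) →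
      (∀ k, k + 2 < right → ¬ (pvGet ts (k + 2) - pvGet ts k ≤ 5)) →
      pvWinLoop ts right left =
        pvBurstB ts := by
  intro fuel
  induction fuel with
  | zero =>
      intro right left hfuel hlr hmin hno
      rw [pvWinLoop]
      have hr : ¬ right < ts.length := by omega
      rw [dif_neg hr]
      symm
      rw [Bool.eq_false_iff]
      intro hb
      obtain ⟨k, hk, h⟩ := (pvBurstB_eq_true ts).mp hb
      exact hno k (by omega) h
  | succ fuel ih =>
      intro right left hfuel hlr hmin hno
      by_cases hr : right < ts.length
      · rw [pvWinLoop, dif_pos hr]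
        obtain ⟨hsle, hsle5, hsmin⟩ :=
          pvShrink_spec ts right left hlr (fun j hj => hmin j hj hr)
        set l' := pvShrink ts right left with hl'
        by_cases hwin : right - l' + 1 ≥ 3
        · simp only [hwin, if_true]
          symm
          rw [pvBurstB_eq_true]
          refine ⟨right - 2, by omega, ?_⟩
          have h2 : right - 2 + 2 = right := by omega
          rw [h2]
          have : pvGet ts l' ≤ pvGet ts (right - 2) := mono l' (right - 2) (by omega) (by omega)
          omega
        · simp only [hwin, if_false]
          refine ih (right + 1) l' (by omega) (by omega) ?_ ?_
          · intro j hj hr1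
            have h1 := hsmin j hj
            have h2 : pvGet ts right ≤ pvGet ts (right + 1) := mono right (right + 1) (by omega) hr1
            omega
          · intro k hk
            rcases Nat.lt_succ_iff_lt_or_eq.mp hk with hk' | hk'
            · exact hno k hk'
            · intro habs
              rw [hk'] at habs
              have hkl : l' ≤ k := by
                by_contra hkl
                have := hsmin k (by omega)
                omega
              omega
      · rw [pvWinLoop, dif_neg hr]
        symm
        rw [Bool.eq_false_iff]
        intro hb
        obtain ⟨k, hk, h⟩ := (pvBurstB_eq_true ts).mp hb
        exact hno k (by omega) h

theorem pvHasBurst_eq (ts : List Int) :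
    pvHasBurst ts =
      pvBurstB ts := by
  unfold pvHasBurst pvBurstB
  rw [PySem.List.pyRange_one, List.any_map]
  have hn : (((ts.length : Int) - 2) - 0).toNat = ts.length - 2 := by omega
  rw [hn]
  apply PySem.List.any_congr_mem
  intro k _
  simp only [Function.comp, zero_add]
  have hgen : ∀ m : Nat, PySem.List.pyGetD ts ((m : Int) + 2) 0 = pvGet ts (m + 2) := by
    intro m
    have hm : ((m : Int) + 2) = ((m + 2 : Nat) : Int) := by push_cast; ring
    rw [hm, PySem.List.pyGetD_natCast]; rfl
  rw [hgen k]
  simp [pvGet]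

theorem pvBurst_agree (ts : List Int) :
    pvWinLoop (PySem.List.sorted ts (fun x => x) false) 0 0 =
      pvHasBurst (PySem.List.sorted ts (fun x => x) false) := by
  set s := PySem.List.sorted ts (fun x => x) false with hs
  have pw : s.Pairwise (fun a b => a ≤ b) := by
    rw [hs]; exact PySem.List.sorted_pairwise ts (fun x => x)
  have mono : ∀ p q : Nat, p ≤ q → q < s.length → pvGet s p ≤ pvGet s q := by
    intro p q hpq hq
    rcases Nat.lt_or_ge p q with hlt | hge
    · have := (List.pairwise_iff_getElem.mp pw) p q (by omega) hq hlt
      unfold pvGet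
      rw [List.getD_eq_getElem s 0 (by omega), List.getD_eq_getElem s 0 hq]
      exact this
    · have : p = q := by omega
      rw [this]
  rw [pvHasBurst_eq]
  exact pvWinLoop_eq s mono s.length 0 0 (by omega) (by omega)
    (fun j hj _ => absurd hj (by omega)) (fun k hk => absurd hk (by omega))

theorem pvFoldl_filter (c : String × List Int → Bool) :
    ∀ (l : List (String × List Int)) (acc : List String),
      l.foldl (fun acc p => if c p then acc ++ [p.1] else acc) acc =
        acc ++ (l.filter c).map (fun p => p.1) := by
  intro l
  induction l with
  | nil => intro acc; simp
  | cons p t ih =>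
      intro acc
      by_cases h : c p <;> simp [List.foldl_cons, h, ih]

-- ===== VERDICT (by name: the statement is the Claim_ definition above) =====
theorem users_with_suspicious_failures_spec : Claim_equal_users_with_suspicious_failures := by
  intro logs _
  unfold Spec_users_with_suspicious_failures
  unfold users_with_suspicious_failures users_with_suspicious_failures_alt
  have hstep : (fun (d : PySem.Dict String (List Int)) (r : String × Int × Bool) =>
      match r with
      | (username, timestamp, is_failure) =>
        if is_failure then d.modify username [] (fun l => l ++ [timestamp]) else d) =
      (fun (d : PySem.Dict String (List Int)) (r : String × Int × Bool) =>
      if r.2.2 then d.modify r.1 [] (fun l => l ++ [r.2.1]) else d) := by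
    funext d r; rcases r with ⟨u, t, f⟩; rfl
  rw [hstep]
  dsimp only
  rw [pvFoldl_filter (fun p => pvWinLoop (PySem.List.sorted p.2 (fun x => x) false) 0 0)]
  simp only [List.nil_append]
  congr 1
  congr 1
  apply List.filter_congr
  intro p _
  exact pvBurst_agree p.2
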